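-- pv_equiv track=rewrite | github.com/zensgit/cad-ml-platform | scripts/ci/check_forward_scorecard_release_gate.py | _release_labels
-- ===== SOURCE A (Python) =====
-- from typing import Any, Dict, Iterable, List, Sequence
--
-- def _release_labels(labels: Sequence[str], prefixes: Sequence[str]) -> List[str]:
--     release_labels: List[str] = []
--     prefix_tokens = [prefix.strip().lower() for prefix in prefixes if prefix.strip()]
--     for label in labels:
--         token = label.strip().lower()
--         for prefix in prefix_tokens:
--             if token == prefix or token.startswith((f"{prefix}:", f"{prefix}/")):
--                 release_labels.append(label)
--                 break
--             if token.startswith((f"{prefix}-", f"{prefix}_", f"{prefix}.")):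
--                 release_labels.append(label)
--                 break
--     return release_labels
-- ===== SOURCE B (Python) =====
-- def _release_labels(labels, prefixes):
--     seps = ":/-_."
--     prefix_set = {p.strip().lower() for p in prefixes if p.strip()}
--     def matches(token):
--         return token in prefix_set or any(
--             c in seps and token[:i] in prefix_set for i, c in enumerate(token)
--         )
--     return [label for label in labels if matches(label.strip().lower())]
-- ===== Notes on version B (the rewrite author's own statement) =====
-- stated objective: faster
-- what changed: Replaces A's per-label scan over the prefix list (six startswith tests per prefix per label) with one hash set of prefix tokens built once, then a single scan of each label's separator positions testing set membership of the slice before each separator.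
import Mathlib
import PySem

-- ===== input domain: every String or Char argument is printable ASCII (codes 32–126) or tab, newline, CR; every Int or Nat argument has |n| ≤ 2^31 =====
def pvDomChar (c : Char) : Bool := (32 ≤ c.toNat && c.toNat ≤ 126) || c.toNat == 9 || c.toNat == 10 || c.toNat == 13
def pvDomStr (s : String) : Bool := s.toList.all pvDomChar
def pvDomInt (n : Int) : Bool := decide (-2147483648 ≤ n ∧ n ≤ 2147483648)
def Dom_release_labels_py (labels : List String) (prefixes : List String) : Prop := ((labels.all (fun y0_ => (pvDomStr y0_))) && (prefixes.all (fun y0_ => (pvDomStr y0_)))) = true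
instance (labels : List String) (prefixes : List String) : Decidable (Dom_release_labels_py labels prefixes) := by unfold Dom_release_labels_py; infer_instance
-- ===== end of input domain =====

-- B replaces A's per-label scan over the prefix list by one prefix set built once plus a
-- scan of the label's separator positions (faster in a timing run; same return value).

-- ===== PORT A =====
-- inner 'for prefix in prefix_tokens: … break' loop: returns true iff some prefix matched
def aMatch (token : String) : List String → Bool
  | [] => false
  | p :: rest =>
    if token == p || PySem.Str.startswith token (p ++ ":") || PySem.Str.startswith token (p ++ "/") then
      true
    else if PySem.Str.startswith token (p ++ "-") || PySem.Str.startswith token (p ++ "_") || PySem.Str.startswith token (p ++ ".") then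
      true
    else aMatch token rest

def release_labels_py (labels : List String) (prefixes : List String) : List String :=
  let prefix_tokens := (prefixes.filter (fun p => !(PySem.Str.strip p == ""))).map
    (fun p => PySem.Str.lower (PySem.Str.strip p))
  labels.foldl (fun acc label =>
    let token := PySem.Str.lower (PySem.Str.strip label)
    if aMatch token prefix_tokens then acc ++ [label] else acc) []

-- ===== PORT B =====
-- seps = ":/-_." as its code points; 'c in seps' for a single char c is exactly list membership
def bSeps : List Char := [':', '/', '-', '_', '.']

-- matches(token): token in prefix_set, or some separator position i has token[:i] in prefix_set
def bMatch (token : String) (prefix_set : PySem.Set String) : Bool :=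
  PySem.Set.contains prefix_set token ||
    (PySem.List.enumerate token.toList).any (fun ic =>
      bSeps.contains ic.2 &&
        PySem.Set.contains prefix_set (String.ofList (PySem.List.slice token.toList none (some ic.1))))

def release_labels_py_alt (labels : List String) (prefixes : List String) : List String :=
  let prefix_set : PySem.Set String := PySem.Set.ofList
    ((prefixes.filter (fun p => !(PySem.Str.strip p == ""))).map
      (fun p => PySem.Str.lower (PySem.Str.strip p)))
  labels.filter (fun label => bMatch (PySem.Str.lower (PySem.Str.strip label)) prefix_set)

-- ===== PRECONDITION & SPEC =====
def Spec_release_labels_py (labels : List String) (prefixes : List String) (out : List String) : Prop := out = release_labels_py_alt labels prefixes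
instance (labels : List String) (prefixes : List String) (out : List String) : Decidable (Spec_release_labels_py labels prefixes out) := by unfold Spec_release_labels_py; infer_instance

-- ===== CLAIM (what is proved, stated in full; the proofs are below) =====
def Claim_equal_release_labels_py : Prop := ∀ (labels : List String) (prefixes : List String), Dom_release_labels_py labels prefixes → Spec_release_labels_py labels prefixes (release_labels_py labels prefixes)

-- ===== LEMMAS AND PROOFS =====

-- A's inner loop is an 'any' over the prefix tokens
lemma aMatch_eq_any (token : String) (ps : List String) :
    aMatch token ps = ps.any (fun p =>
      (token == p || PySem.Str.startswith token (p ++ ":") || PySem.Str.startswith token (p ++ "/")) ||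
      (PySem.Str.startswith token (p ++ "-") || PySem.Str.startswith token (p ++ "_") || PySem.Str.startswith token (p ++ "."))) := by
  induction ps with
  | nil => rfl
  | cons p rest ih =>
    have hb : ∀ (a b r : Bool), (if a then true else if b then true else r) = (a || b || r) := by decide
    simp only [aMatch, List.any_cons, hb, Bool.or_assoc, ih]

-- a prefix-then-separator match is the same fact as a separator position whose left slice is the prefix
lemma sep_decomp_iff (t : List Char) (ps : List String) :
    (∃ p ∈ ps, ∃ c ∈ bSeps, p.toList ++ [c] <+: t) ↔
    (∃ k, ∃ _ : k < t.length, t[k] ∈ bSeps ∧ String.ofList (t.take k) ∈ ps) := by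
  constructor
  · rintro ⟨p, hp, c, hc, hpre⟩
    have hlen : p.toList.length + 1 ≤ t.length := by simpa using hpre.length_le
    have hk : p.toList.length < t.length := by omega
    have hp0 : p.toList <+: t := (List.prefix_append p.toList [c]).trans hpre
    have htake0 : t.take p.toList.length = p.toList := (List.prefix_iff_eq_take.mp hp0).symm
    have htake1 : t.take (p.toList.length + 1) = p.toList ++ [c] := by
      have h := List.prefix_iff_eq_take.mp hpre
      simpa using h.symm
    have hgetc : t[p.toList.length]'hk = c := by
      have h1 := List.take_succ_eq_append_getElem hk
      rw [htake0, htake1] at h1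
      have h2 := List.append_cancel_left h1
      simpa using h2.symm
    exact ⟨p.toList.length, hk, hgetc ▸ hc, by rw [htake0, String.ofList_toList]; exact hp⟩
  · rintro ⟨k, hk, hsep, hmem⟩
    refine ⟨String.ofList (t.take k), hmem, t[k], hsep, ?_⟩
    rw [String.toList_ofList, ← List.take_succ_eq_append_getElem hk]
    exact List.take_prefix _ _

-- token.startswith(p + s) for a one-character s, as a prefix fact on the code points
lemma sw_intro {token p : String} {c : Char} {s : String} (hs : s.toList = [c])
    (h : PySem.Str.startswith token (p ++ s) = true) : p.toList ++ [c] <+: token.toList := by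
  have h' : PySem.Chars.startswith token.toList ((p ++ s).toList) = true := by simpa using h
  rw [String.toList_append, hs] at h'
  exact (PySem.Chars.startswith_iff _ _).mp h'

lemma sw_elim {token p : String} {c : Char} {s : String} (hs : s.toList = [c])
    (h : p.toList ++ [c] <+: token.toList) : PySem.Str.startswith token (p ++ s) = true := by
  have h' : PySem.Chars.startswith token.toList ((p ++ s).toList) = true := by
    rw [String.toList_append, hs]; exact (PySem.Chars.startswith_iff _ _).mpr h
  simpa using h'

-- pointwise agreement of A's inner loop with B's matches()
lemma match_agree (token : String) (ps : List String) :
    aMatch token ps = bMatch token (PySem.Set.ofList ps) := by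
  rw [Bool.eq_iff_iff, aMatch_eq_any]
  unfold bMatch
  rw [Bool.or_eq_true, List.any_eq_true, List.any_eq_true]
  constructor
  · rintro ⟨p, hp, hcond⟩
    simp only [Bool.or_eq_true] at hcond
    rcases hcond with ((heq | hsw) | hsw) | ((hsw | hsw) | hsw)
    case inl.inl.inl =>
      left
      rw [PySem.Set.contains_iff, PySem.Set.mem_ofList]
      exact (beq_iff_eq.mp heq) ▸ hp
    all_goals {
      right
      have hpre : ∃ c ∈ bSeps, p.toList ++ [c] <+: token.toList := by
        first
        | exact ⟨':', by decide, sw_intro (by decide) hsw⟩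
        | exact ⟨'/', by decide, sw_intro (by decide) hsw⟩
        | exact ⟨'-', by decide, sw_intro (by decide) hsw⟩
        | exact ⟨'_', by decide, sw_intro (by decide) hsw⟩
        | exact ⟨'.', by decide, sw_intro (by decide) hsw⟩
      rcases (sep_decomp_iff token.toList ps).mp ⟨p, hp, hpre⟩ with ⟨k, hk, hsep, hmem⟩
      refine ⟨((0 : Int) + k, token.toList[k]), ?_, ?_⟩
      · rw [PySem.List.mem_enumerate_iff]; exact ⟨k, hk, rfl⟩
      · simp only [Bool.and_eq_true, List.contains_iff_mem]
        refine ⟨hsep, ?_⟩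
        rw [PySem.Set.contains_iff, PySem.Set.mem_ofList]
        simp only [zero_add]
        rw [PySem.List.slice_to token.toList (Int.natCast_nonneg k)]
        simpa using hmem
    }
  · rintro (h | ⟨ic, hic, h⟩)
    · rw [PySem.Set.contains_iff, PySem.Set.mem_ofList] at h
      exact ⟨token, h, by simp⟩
    · rw [PySem.List.mem_enumerate_iff] at hic
      obtain ⟨k, hk, rfl⟩ := hic
      simp only [Bool.and_eq_true, List.contains_iff_mem] at h
      obtain ⟨hsep, hmem⟩ := h
      rw [PySem.Set.contains_iff, PySem.Set.mem_ofList] at hmem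
      simp only [zero_add] at hmem
      rw [PySem.List.slice_to token.toList (Int.natCast_nonneg k)] at hmem
      simp only [Int.toNat_natCast] at hmem
      obtain ⟨p, hp, c, hc, hpre⟩ := (sep_decomp_iff token.toList ps).mpr ⟨k, hk, hsep, hmem⟩
      refine ⟨p, hp, ?_⟩
      simp only [Bool.or_eq_true]
      simp only [bSeps, List.mem_cons, List.not_mem_nil, or_false] at hc
      rcases hc with rfl | rfl | rfl | rfl | rfl
      · exact Or.inl (Or.inl (Or.inr (sw_elim (by decide) hpre)))
      · exact Or.inl (Or.inr (sw_elim (by decide) hpre))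
      · exact Or.inr (Or.inl (Or.inl (sw_elim (by decide) hpre)))
      · exact Or.inr (Or.inl (Or.inr (sw_elim (by decide) hpre)))
      · exact Or.inr (Or.inr (sw_elim (by decide) hpre))

-- ===== VERDICT (by name: the statement is the Claim_ definition above) =====
theorem release_labels_py_spec : Claim_equal_release_labels_py := by
  intro labels prefixes _
  unfold Spec_release_labels_py release_labels_py release_labels_py_alt
  rw [PySem.List.foldl_append_if_eq_filter]
  simp only [List.nil_append]
  exact List.filter_congr (fun label _ => by rw [match_agree])
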